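-- pv_equiv track=rewrite | github.com/eunomia-bpf/bpf-benchmark | daemon/tests/static_verify.py | format_hex_blob
-- ===== SOURCE A (Python) =====
-- def format_hex_blob(blob: str | None) -> str | None:
--     if not blob:
--         return None
--     cleaned = blob.strip()
--     if not cleaned:
--         return None
--     if len(cleaned) % 16 != 0:
--         return cleaned
--     lines: list[str] = []
--     for pc, start in enumerate(range(0, len(cleaned), 16)):
--         insn_hex = cleaned[start : start + 16]
--         byte_pairs = " ".join(insn_hex[index : index + 2] for index in range(0, len(insn_hex), 2))
--         lines.append(f"{pc:4d}: {byte_pairs}")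
--     return "\n".join(lines)
-- ===== SOURCE B (Python) =====
-- def format_hex_blob(blob: str | None) -> str | None:
--     if not blob:
--         return None
--     cleaned = blob.strip()
--     if not cleaned:
--         return None
--     if len(cleaned) % 16 != 0:
--         return cleaned
--     out: list[str] = []
--     for i, ch in enumerate(cleaned):
--         if i % 16 == 0:
--             out.append(("\n" if i else "") + f"{i // 16:4d}: ")
--         elif i % 2 == 0:
--             out.append(" ")
--         out.append(ch)
--     return "".join(out)
-- ===== Notes on version B (the rewrite author's own statement) =====
-- stated objective: alternative
-- what changed: B keeps the three guards but replaces A's chunk-the-string-into-16-char-slices-then-slice-pairs formatting by a single character-level streaming pass: one loop over enumerate(cleaned) that emits the line header, the pair separator or nothing before each character, driven by i%16 and i%2, with no slicing at all.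
import Mathlib
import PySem

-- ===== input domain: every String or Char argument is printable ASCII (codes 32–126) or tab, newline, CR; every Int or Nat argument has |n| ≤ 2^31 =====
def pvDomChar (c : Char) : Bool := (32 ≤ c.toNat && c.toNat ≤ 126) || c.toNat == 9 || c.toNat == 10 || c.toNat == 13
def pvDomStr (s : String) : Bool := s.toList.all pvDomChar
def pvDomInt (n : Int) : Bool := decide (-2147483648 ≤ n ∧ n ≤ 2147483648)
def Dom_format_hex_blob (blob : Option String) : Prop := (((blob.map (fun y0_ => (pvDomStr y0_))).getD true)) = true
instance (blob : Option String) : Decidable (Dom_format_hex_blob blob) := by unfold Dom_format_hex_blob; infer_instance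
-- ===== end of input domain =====

-- B replaces A's chunk-of-16-then-pair slicing by a single character-level streaming
-- pass that decides what to emit before each char from i%16 and i%2 (objective: alternative).

-- f"{pc:4d}" (both Pythons contain this very f-string): str(pc) left-padded with spaces to width 4
def pvFmt4 (n : Int) : List Char :=
  let ds := PySem.Int.toChars n
  List.replicate (4 - ds.length) ' ' ++ ds

-- ===== PORT A =====
def format_hex_blob (blob : Option String) : Option String :=
  match blob with
  | none => none
  | some s =>
    if s = "" then none
    else
      let cleaned := (PySem.Str.strip s).toList
      if cleaned = [] then none
      else if ((cleaned.length : Int)) % 16 ≠ 0 then some (String.ofList cleaned)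
      else
        let lines : List (List Char) :=
          (PySem.List.enumerate (PySem.List.pyRange 0 (cleaned.length : Int) 16)).foldl
            (fun acc p =>
              let insn := PySem.List.slice cleaned (some p.2) (some (p.2 + 16))
              let bytePairs := PySem.Chars.join [' ']
                ((PySem.List.pyRange 0 (insn.length : Int) 2).map
                  (fun i => PySem.List.slice insn (some i) (some (i + 2))))
              acc ++ [pvFmt4 p.1 ++ [':', ' '] ++ bytePairs]) []
        some (String.ofList (PySem.Chars.join ['\n'] lines))

-- ===== PORT B =====
-- what B's loop body appends (as characters) for one (i, ch) of enumerate(cleaned)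
def pvEmit (p : Int × Char) : List Char :=
  (if PySem.Int.mod p.1 16 = 0 then
      (if p.1 = 0 then [] else ['\n']) ++ pvFmt4 (PySem.Int.floordiv p.1 16) ++ [':', ' ']
    else if PySem.Int.mod p.1 2 = 0 then [' '] else []) ++ [p.2]

def format_hex_blob_alt (blob : Option String) : Option String :=
  match blob with
  | none => none
  | some s =>
    if s = "" then none
    else
      let cleaned := (PySem.Str.strip s).toList
      if cleaned = [] then none
      else if ((cleaned.length : Int)) % 16 ≠ 0 then some (String.ofList cleaned)
      else
        -- ''.join(out) where the loop extends out piecewise = concatenation of the pieces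
        let out := (PySem.List.enumerate cleaned).foldl (fun acc p => acc ++ pvEmit p) []
        some (String.ofList out)

-- ===== PRECONDITION & SPEC =====
def Spec_format_hex_blob (blob : Option String) (out : Option String) : Prop := out = format_hex_blob_alt blob
instance (blob : Option String) (out : Option String) : Decidable (Spec_format_hex_blob blob out) := by unfold Spec_format_hex_blob; infer_instance

-- ===== CLAIM (what is proved, stated in full; the proofs are below) =====
def Claim_equal_format_hex_blob : Prop := ∀ (blob : Option String), Dom_format_hex_blob blob → Spec_format_hex_blob blob (format_hex_blob blob)

-- ===== LEMMAS AND PROOFS =====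
set_option maxHeartbeats 2000000

-- common normal form: line pc of the output, and the whole output, over Nat indices
def pvLine (k : Nat) (cs : List Char) : List Char :=
  pvFmt4 (k : Int) ++ [':', ' '] ++
    PySem.Chars.join [' '] ((List.range 8).map (fun j => (cs.drop (16 * k + 2 * j)).take 2))

def pvNF (cs : List Char) (N : Nat) : List Char :=
  PySem.Chars.join ['\n'] ((List.range N).map (fun k => pvLine k cs))

-- pvEmit with a Nat index
def pvEmitN (i : Nat) (c : Char) : List Char :=
  (if i % 16 = 0 then
      (if i = 0 then [] else ['\n']) ++ pvFmt4 ((i / 16 : Nat) : Int) ++ [':', ' ']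
    else if i % 2 = 0 then [' '] else []) ++ [c]

theorem pvSlice {α : Type} (xs : List α) (i b : Int) (j n : Nat) (hi : i = (j:Int)) (hb : b = i + (n:Int)) :
    PySem.List.slice xs (some i) (some b) = (xs.drop j).take n := by
  subst hi; subst hb; exact PySem.List.slice_natCast_add xs j n

theorem pvRangeN (a c : Int) (n : Nat) (hc : 0 < c)
    (hcount : (if (0:Int) < a then ((a - 0 + c - 1) / c).toNat else 0) = n) :
    PySem.List.pyRange 0 a c = (List.range n).map (fun k => 0 + c * (k:Nat)) := by
  rw [PySem.List.pyRange_of_pos 0 a hc, hcount]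

theorem pvEmit_natCast (i : Nat) (c : Char) : pvEmit ((i : Int), c) = pvEmitN i c := by
  unfold pvEmit pvEmitN
  dsimp only
  rw [PySem.Int.mod_eq_emod_of_pos (by norm_num), PySem.Int.mod_eq_emod_of_pos (by norm_num),
      PySem.Int.floordiv_eq_ediv_of_pos (by norm_num)]
  have e1 : ((i:Int) % 16 = 0) ↔ i % 16 = 0 := by omega
  have e2 : ((i:Int) = 0) ↔ i = 0 := by omega
  have e3 : ((i:Int) % 2 = 0) ↔ i % 2 = 0 := by omega
  have e4 : ((i:Int) / 16) = ((i / 16 : Nat) : Int) := by omega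
  simp only [e1, e2, e3, e4]

theorem pvEnumFlat (cs : List Char) (s : Nat) :
    (PySem.List.enumerate cs (s : Int)).flatMap pvEmit
      = (cs.zipIdx s).flatMap (fun p => pvEmitN p.2 p.1) := by
  induction cs generalizing s with
  | nil => simp [PySem.List.enumerate]
  | cons c t ih =>
    rw [PySem.List.enumerate_cons, List.zipIdx_cons]
    have h1 : ((s : Int) + 1) = ((s + 1 : Nat) : Int) := by push_cast; ring
    simp only [List.flatMap_cons, h1, ih, pvEmit_natCast]

theorem pvEmitN_head (N : Nat) (c : Char) :
    pvEmitN (16 * N) c = ((if N = 0 then [] else ['\n']) ++ pvFmt4 (N : Int) ++ [':', ' ']) ++ [c] := by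
  unfold pvEmitN
  rw [if_pos (by omega : 16 * N % 16 = 0)]
  have h2 : 16 * N / 16 = N := by omega
  rw [h2]
  by_cases hN : N = 0
  · subst hN; simp
  · rw [if_neg (by omega), if_neg hN]

theorem pvEmitN_odd (i : Nat) (c : Char) (h16 : i % 16 ≠ 0) (h2 : i % 2 = 1) :
    pvEmitN i c = [c] := by
  unfold pvEmitN
  rw [if_neg h16, if_neg (by omega)]
  simp

theorem pvEmitN_even (i : Nat) (c : Char) (h16 : i % 16 ≠ 0) (h2 : i % 2 = 0) :
    pvEmitN i c = [' ', c] := by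
  unfold pvEmitN
  rw [if_neg h16, if_pos h2]
  simp

theorem pvJoinAppend (sep : List Char) (ls : List (List Char)) (l : List Char) :
    PySem.Chars.join sep (ls ++ [l])
      = PySem.Chars.join sep ls ++ (if ls = [] then [] else sep) ++ l := by
  induction ls with
  | nil => simp [PySem.Chars.join_singleton, PySem.Chars.join_nil]
  | cons x xs ih =>
    cases xs with
    | nil => simp [PySem.Chars.join_cons_cons, PySem.Chars.join_singleton]
    | cons y ys =>
      have ih' : PySem.Chars.join sep (y :: (ys ++ [l]))
          = (PySem.Chars.join sep (y :: ys) ++ if (y :: ys : List (List Char)) = [] then [] else sep) ++ l := ih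
      show PySem.Chars.join sep (x :: y :: (ys ++ [l]))
          = (PySem.Chars.join sep (x :: y :: ys) ++ if (x :: y :: ys : List (List Char)) = [] then [] else sep) ++ l
      rw [PySem.Chars.join_cons_cons, ih', PySem.Chars.join_cons_cons]
      simp [List.append_assoc]

-- the 16 chars of one chunk, streamed starting at index 16*N, give newline-prefix + line N
theorem pvChunk (N : Nat) (bk : List Char) (hB : bk.length = 16) :
    (bk.zipIdx (16 * N)).flatMap (fun p => pvEmitN p.2 p.1)
      = (if N = 0 then [] else ['\n']) ++ pvFmt4 (N : Int) ++ [':', ' '] ++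
          PySem.Chars.join [' '] ((List.range 8).map (fun j => (bk.drop (2 * j)).take 2)) := by
  obtain ⟨c0, bk, rfl⟩ : ∃ c t, bk = c :: t := by
    cases bk with
    | nil => simp at hB
    | cons a t => exact ⟨a, t, rfl⟩
  simp only [List.length_cons] at hB
  obtain ⟨c1, bk, rfl⟩ : ∃ c t, bk = c :: t := by
    cases bk with
    | nil => simp at hB
    | cons a t => exact ⟨a, t, rfl⟩
  simp only [List.length_cons] at hB
  obtain ⟨c2, bk, rfl⟩ : ∃ c t, bk = c :: t := by
    cases bk with
    | nil => simp at hB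
    | cons a t => exact ⟨a, t, rfl⟩
  simp only [List.length_cons] at hB
  obtain ⟨c3, bk, rfl⟩ : ∃ c t, bk = c :: t := by
    cases bk with
    | nil => simp at hB
    | cons a t => exact ⟨a, t, rfl⟩
  simp only [List.length_cons] at hB
  obtain ⟨c4, bk, rfl⟩ : ∃ c t, bk = c :: t := by
    cases bk with
    | nil => simp at hB
    | cons a t => exact ⟨a, t, rfl⟩
  simp only [List.length_cons] at hB
  obtain ⟨c5, bk, rfl⟩ : ∃ c t, bk = c :: t := by
    cases bk with
    | nil => simp at hB
    | cons a t => exact ⟨a, t, rfl⟩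
  simp only [List.length_cons] at hB
  obtain ⟨c6, bk, rfl⟩ : ∃ c t, bk = c :: t := by
    cases bk with
    | nil => simp at hB
    | cons a t => exact ⟨a, t, rfl⟩
  simp only [List.length_cons] at hB
  obtain ⟨c7, bk, rfl⟩ : ∃ c t, bk = c :: t := by
    cases bk with
    | nil => simp at hB
    | cons a t => exact ⟨a, t, rfl⟩
  simp only [List.length_cons] at hB
  obtain ⟨c8, bk, rfl⟩ : ∃ c t, bk = c :: t := by
    cases bk with
    | nil => simp at hB
    | cons a t => exact ⟨a, t, rfl⟩
  simp only [List.length_cons] at hB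
  obtain ⟨c9, bk, rfl⟩ : ∃ c t, bk = c :: t := by
    cases bk with
    | nil => simp at hB
    | cons a t => exact ⟨a, t, rfl⟩
  simp only [List.length_cons] at hB
  obtain ⟨c10, bk, rfl⟩ : ∃ c t, bk = c :: t := by
    cases bk with
    | nil => simp at hB
    | cons a t => exact ⟨a, t, rfl⟩
  simp only [List.length_cons] at hB
  obtain ⟨c11, bk, rfl⟩ : ∃ c t, bk = c :: t := by
    cases bk with
    | nil => simp at hB
    | cons a t => exact ⟨a, t, rfl⟩
  simp only [List.length_cons] at hB
  obtain ⟨c12, bk, rfl⟩ : ∃ c t, bk = c :: t := by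
    cases bk with
    | nil => simp at hB
    | cons a t => exact ⟨a, t, rfl⟩
  simp only [List.length_cons] at hB
  obtain ⟨c13, bk, rfl⟩ : ∃ c t, bk = c :: t := by
    cases bk with
    | nil => simp at hB
    | cons a t => exact ⟨a, t, rfl⟩
  simp only [List.length_cons] at hB
  obtain ⟨c14, bk, rfl⟩ : ∃ c t, bk = c :: t := by
    cases bk with
    | nil => simp at hB
    | cons a t => exact ⟨a, t, rfl⟩
  simp only [List.length_cons] at hB
  obtain ⟨c15, bk, rfl⟩ : ∃ c t, bk = c :: t := by
    cases bk with
    | nil => simp at hB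
    | cons a t => exact ⟨a, t, rfl⟩
  simp only [List.length_cons] at hB
  have hnil : bk = [] := by
    cases bk with
    | nil => rfl
    | cons a t => simp at hB
  subst hnil
  simp only [List.zipIdx_cons, List.zipIdx_nil, List.flatMap_cons, List.flatMap_nil]
  rw [pvEmitN_head,
      pvEmitN_odd (16*N+1) _ (by omega) (by omega),
      pvEmitN_even (16*N+1+1) _ (by omega) (by omega),
      pvEmitN_odd (16*N+1+1+1) _ (by omega) (by omega),
      pvEmitN_even (16*N+1+1+1+1) _ (by omega) (by omega),
      pvEmitN_odd (16*N+1+1+1+1+1) _ (by omega) (by omega),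
      pvEmitN_even (16*N+1+1+1+1+1+1) _ (by omega) (by omega),
      pvEmitN_odd (16*N+1+1+1+1+1+1+1) _ (by omega) (by omega),
      pvEmitN_even (16*N+1+1+1+1+1+1+1+1) _ (by omega) (by omega),
      pvEmitN_odd (16*N+1+1+1+1+1+1+1+1+1) _ (by omega) (by omega),
      pvEmitN_even (16*N+1+1+1+1+1+1+1+1+1+1) _ (by omega) (by omega),
      pvEmitN_odd (16*N+1+1+1+1+1+1+1+1+1+1+1) _ (by omega) (by omega),
      pvEmitN_even (16*N+1+1+1+1+1+1+1+1+1+1+1+1) _ (by omega) (by omega),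
      pvEmitN_odd (16*N+1+1+1+1+1+1+1+1+1+1+1+1+1) _ (by omega) (by omega),
      pvEmitN_even (16*N+1+1+1+1+1+1+1+1+1+1+1+1+1+1) _ (by omega) (by omega),
      pvEmitN_odd (16*N+1+1+1+1+1+1+1+1+1+1+1+1+1+1+1) _ (by omega) (by omega)]
  simp [List.range_succ, PySem.Chars.join_cons_cons, PySem.Chars.join_singleton]

theorem pvLine_take (k N : Nat) (cs : List Char) (hk : k < N) :
    pvLine k (cs.take (16 * N)) = pvLine k cs := by
  unfold pvLine
  congr 1
  apply congrArg
  apply List.map_congr_left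
  intro j hj
  have hj8 : j < 8 := List.mem_range.mp hj
  rw [List.drop_take]
  rw [List.take_take]
  congr 1
  omega

theorem pvBflat : ∀ (N : Nat) (cs : List Char), cs.length = 16 * N →
    (cs.zipIdx 0).flatMap (fun p => pvEmitN p.2 p.1) = pvNF cs N := by
  intro N
  induction N with
  | zero =>
    intro cs h
    have : cs = [] := List.eq_nil_of_length_eq_zero (by omega)
    subst this
    simp [pvNF, PySem.Chars.join_nil]
  | succ N ih =>
    intro cs h
    have hcs : cs.take (16 * N) ++ cs.drop (16 * N) = cs := List.take_append_drop _ _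
    have hF : (cs.take (16 * N)).length = 16 * N := by simp; omega
    have hB : (cs.drop (16 * N)).length = 16 := by simp; omega
    conv_lhs => rw [← hcs]
    rw [List.zipIdx_append, List.flatMap_append, hF, ih _ hF, Nat.zero_add,
        pvChunk N _ hB]
    have hmap : (List.range N).map (fun k => pvLine k (cs.take (16 * N)))
        = (List.range N).map (fun k => pvLine k cs) := by
      apply List.map_congr_left
      intro k hk; exact pvLine_take k N cs (List.mem_range.mp hk)
    have hlast : pvLine N cs
        = pvFmt4 (N : Int) ++ [':', ' '] ++
            PySem.Chars.join [' ']
              ((List.range 8).map (fun j => ((cs.drop (16 * N)).drop (2 * j)).take 2)) := by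
      unfold pvLine
      congr 2
      apply List.map_congr_left
      intro j _
      rw [List.drop_drop]
    unfold pvNF
    conv_rhs => rw [List.range_succ]
    rw [List.map_append, List.map_singleton, pvJoinAppend, hmap, hlast]
    by_cases hN : N = 0
    · subst hN
      simp [List.append_assoc]
    · have hne : ((List.range N).map (fun k => pvLine k cs)) ≠ [] := by
        simp [hN]
      rw [if_neg hne]
      simp [List.append_assoc, hN]

theorem pvALines (cs : List Char) (N : Nat) (hL : cs.length = 16 * N) :
    (PySem.List.enumerate (PySem.List.pyRange 0 (cs.length : Int) 16)).map
      (fun p =>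
        let insn := PySem.List.slice cs (some p.2) (some (p.2 + 16))
        pvFmt4 p.1 ++ [':', ' '] ++ PySem.Chars.join [' ']
          ((PySem.List.pyRange 0 (insn.length : Int) 2).map
            (fun i => PySem.List.slice insn (some i) (some (i + 2)))))
    = (List.range N).map (fun k => pvLine k cs) := by
  have hcs : (cs.length : Int) = 16 * (N : Int) := by rw [hL]; push_cast; ring
  have hR16 : PySem.List.pyRange 0 (cs.length : Int) 16
      = (List.range N).map (fun (k : Nat) => 0 + 16 * (k : Int)) := by
    apply pvRangeN _ _ N (by norm_num)
    rw [hcs]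
    rcases Nat.eq_zero_or_pos N with h | h
    · subst h; norm_num
    · have h0 : (0:Int) < 16 * (N:Int) := by positivity
      rw [if_pos h0]; omega
  rw [hR16]
  apply List.ext_getElem
  · simp [PySem.List.length_enumerate]
  · intro k hk1 hk2
    have hkN : k < N := by
      simpa [PySem.List.length_enumerate] using hk1
    simp only [List.getElem_map, PySem.List.getElem_enumerate, List.getElem_range]
    have hinsn : PySem.List.slice cs (some (0 + 16 * (k:Int))) (some (0 + 16 * (k:Int) + 16))
        = (cs.drop (16*k)).take 16 := pvSlice cs _ _ (16*k) 16 (by push_cast; ring) (by push_cast; ring)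
    rw [hinsn]
    have hil : (((cs.drop (16*k)).take 16).length : Int) = ((16:Nat) : Int) := by
      simp [List.length_take, List.length_drop]; omega
    rw [hil]
    have hR2' : PySem.List.pyRange 0 ((16:Nat) : Int) 2
        = (List.range 8).map (fun (j : Nat) => 0 + 2 * (j : Int)) := by
      apply pvRangeN _ _ 8 (by norm_num)
      decide
    rw [hR2']
    unfold pvLine
    have hfmt : (0 + 16 * (k:Int)) = 16 * (k:Int) := by ring
    congr 1
    · norm_num
    · apply congrArg
      rw [List.map_map]
      apply List.ext_getElem
      · simp
      · intro j hj1 hj2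
        have hj8 : j < 8 := by simpa using hj1
        simp only [List.getElem_map, List.getElem_range, Function.comp]
        have hA : PySem.List.slice ((cs.drop (16*k)).take 16) (some (0 + 2 * (j:Int))) (some (0 + 2 * (j:Int) + 2))
            = (((cs.drop (16*k)).take 16).drop (2*j)).take 2 :=
          pvSlice _ _ _ (2*j) 2 (by push_cast; ring) (by push_cast; ring)
        rw [hA]
        rw [List.drop_take, List.take_take]
        have hmin : min 2 (16 - 2*j) = 2 := by omega
        rw [hmin, List.drop_drop]

-- ===== VERDICT (by name: the statement is the Claim_ definition above) =====
theorem format_hex_blob_spec : Claim_equal_format_hex_blob := by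
  intro blob _
  unfold Spec_format_hex_blob format_hex_blob format_hex_blob_alt
  cases blob with
  | none => rfl
  | some s =>
    simp only [ne_eq]
    split_ifs with h1 h2 h3
    · rfl
    · rfl
    · have hdvdN : 16 ∣ (PySem.Str.strip s).toList.length := by
        have h16 : (16 : Int) ∣ ((PySem.Str.strip s).toList.length : Int) :=
          Int.dvd_of_emod_eq_zero h3
        exact_mod_cast h16
      obtain ⟨N, hN⟩ := hdvdN
      rw [PySem.List.foldl_append_singleton_eq_map, List.nil_append,
          PySem.List.foldl_append_eq_flatMap, List.nil_append]
      have h0 : ((0 : Nat) : Int) = (0 : Int) := rfl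
      rw [pvALines (PySem.Str.strip s).toList N hN]
      have henum : PySem.List.enumerate (PySem.Str.strip s).toList 0
          = PySem.List.enumerate (PySem.Str.strip s).toList (((0:Nat) : Int)) := rfl
      rw [henum, pvEnumFlat, pvBflat N _ hN]
      rfl
    · rfl
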